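-- pv_equiv track=rewrite | github.com/IT-Gods/Modul431 | sourcecode/utils/functions.py | detectCollisionEnemies
-- ===== SOURCE A (Python) =====
-- def detectCollisionEnemies(XYBullet,sizeBullet,XYEnemy,sizeEnemy,distEnemy,aliveEnemy):
--     for column in range(len(aliveEnemy)):
--         for row in range(len(aliveEnemy[column])):
--             if aliveEnemy[column][row]:
--                 if XYBullet[0] > (XYEnemy[0] + sizeEnemy[0]*column + distEnemy[0]*column)-sizeBullet[0] and XYBullet[0] < (XYEnemy[0] + sizeEnemy[0]*(column + 1) + distEnemy[0]*column):
--                     if XYBullet[1] > (XYEnemy[1] + sizeEnemy[1]*row + distEnemy[1]*row) and XYBullet[1] < (XYEnemy[1] + sizeEnemy[1]*row + distEnemy[1]*(row + 1)):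
--                         aliveEnemy[column][row] = False
--
--                         return False
--
--
--
--     return True
-- ===== SOURCE B (Python) =====
-- def _band(p, lo, hi, n):
--     # indices c in range(n) with lo < p*c < hi, by solving the inequalities
--     if p == 0:
--         return range(n) if lo < 0 < hi else range(0)
--     if p < 0:
--         p, lo, hi = -p, -hi, -lo
--     start = lo // p + 1          # smallest c with lo < p*c
--     stop = -((-hi) // p)         # = ceil(hi/p): first c with p*c >= hi
--     return range(max(0, start), min(n, stop))
--
--
-- def detectCollisionEnemies(XYBullet, sizeBullet, XYEnemy, sizeEnemy, distEnemy, aliveEnemy):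
--     # Solve the collision inequalities algebraically: the x-test (column-only) and
--     # y-test (row-only) each determine an interval of candidate indices, so only a
--     # small rectangle of cells is ever inspected instead of the whole grid.
--     if not any(map(any, aliveEnemy)):
--         return True
--     x = XYBullet[0]
--     cols = [c for c in _band(sizeEnemy[0] + distEnemy[0],
--                              x - XYEnemy[0] - sizeEnemy[0],
--                              x - XYEnemy[0] + sizeBullet[0],
--                              len(aliveEnemy))
--             if any(aliveEnemy[c])]
--     if not cols:
--         return True
--     y = XYBullet[1]
--     for c in cols:
--         col = aliveEnemy[c]
--         for r in _band(sizeEnemy[1] + distEnemy[1],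
--                        y - XYEnemy[1] - distEnemy[1],
--                        y - XYEnemy[1],
--                        len(col)):
--             if col[r]:
--                 col[r] = False
--                 return False
--     return True
-- ===== Notes on version B (the rewrite author's own statement) =====
-- stated objective: alternative
-- what changed: B does not scan the grid: it solves the x- and y-interval inequalities algebraically (integer floor/ceil division) to get the ranges of candidate columns and rows, and inspects only that small rectangle of cells.
import Mathlib
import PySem

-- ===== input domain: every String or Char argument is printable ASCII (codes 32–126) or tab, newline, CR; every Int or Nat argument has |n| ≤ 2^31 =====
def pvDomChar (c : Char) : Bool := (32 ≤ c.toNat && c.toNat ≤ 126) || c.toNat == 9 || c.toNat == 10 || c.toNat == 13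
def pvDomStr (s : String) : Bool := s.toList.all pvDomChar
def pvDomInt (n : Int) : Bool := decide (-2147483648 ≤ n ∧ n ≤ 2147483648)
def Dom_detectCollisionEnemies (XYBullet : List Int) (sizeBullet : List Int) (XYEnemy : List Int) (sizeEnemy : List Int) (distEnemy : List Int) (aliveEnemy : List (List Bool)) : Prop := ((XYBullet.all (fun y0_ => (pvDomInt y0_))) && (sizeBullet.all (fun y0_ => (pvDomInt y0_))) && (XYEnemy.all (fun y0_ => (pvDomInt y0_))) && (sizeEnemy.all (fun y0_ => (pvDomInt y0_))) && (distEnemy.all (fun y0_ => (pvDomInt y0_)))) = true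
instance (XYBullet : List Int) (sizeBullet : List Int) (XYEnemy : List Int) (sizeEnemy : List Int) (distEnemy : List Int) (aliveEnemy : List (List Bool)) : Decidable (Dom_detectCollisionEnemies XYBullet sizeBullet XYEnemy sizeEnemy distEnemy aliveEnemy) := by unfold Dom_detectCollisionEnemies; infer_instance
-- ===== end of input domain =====

-- B solves the x/y collision inequalities algebraically and inspects only the resulting small
-- candidate rectangle instead of scanning the whole grid; objective: alternative. A also mutates
-- aliveEnemy in place on a hit — B performs the same mutation in Python; the equivalence proved
-- here is about the return value.

-- ===== PORT A =====
-- inner loop over one column's rows; none = IndexError (excluded by Pre_)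
def pvARow (XYBullet sizeBullet XYEnemy sizeEnemy distEnemy : List Int) (c : Int) :
    List Bool → Int → Option Bool
  | [], _ => some false
  | a :: rest, r =>
    if a then
      match (PySem.List.pyGet? XYBullet) 0, (PySem.List.pyGet? XYEnemy) 0, (PySem.List.pyGet? sizeEnemy) 0, (PySem.List.pyGet? distEnemy) 0,
            (PySem.List.pyGet? sizeBullet) 0 with
      | some xb0, some xe0, some se0, some de0, some sb0 =>
        if xb0 > xe0 + se0 * c + de0 * c - sb0 ∧ xb0 < xe0 + se0 * (c + 1) + de0 * c then
          match (PySem.List.pyGet? XYBullet) 1, (PySem.List.pyGet? XYEnemy) 1, (PySem.List.pyGet? sizeEnemy) 1, (PySem.List.pyGet? distEnemy) 1 with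
          | some xb1, some xe1, some se1, some de1 =>
            if xb1 > xe1 + se1 * r + de1 * r ∧ xb1 < xe1 + se1 * r + de1 * (r + 1) then some true
            else pvARow XYBullet sizeBullet XYEnemy sizeEnemy distEnemy c rest (r + 1)
          | _, _, _, _ => none
        else pvARow XYBullet sizeBullet XYEnemy sizeEnemy distEnemy c rest (r + 1)
      | _, _, _, _, _ => none
    else pvARow XYBullet sizeBullet XYEnemy sizeEnemy distEnemy c rest (r + 1)

-- outer loop over columns
def pvACol (XYBullet sizeBullet XYEnemy sizeEnemy distEnemy : List Int) :
    List (List Bool) → Int → Option Bool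
  | [], _ => some false
  | col :: rest, c =>
    match pvARow XYBullet sizeBullet XYEnemy sizeEnemy distEnemy c col 0 with
    | none => none
    | some true => some true
    | some false => pvACol XYBullet sizeBullet XYEnemy sizeEnemy distEnemy rest (c + 1)

def detectCollisionEnemies (XYBullet : List Int) (sizeBullet : List Int) (XYEnemy : List Int) (sizeEnemy : List Int) (distEnemy : List Int) (aliveEnemy : List (List Bool)) : Bool :=
  match pvACol XYBullet sizeBullet XYEnemy sizeEnemy distEnemy aliveEnemy 0 with
  | some hit => !hit
  | none => true  -- IndexError in Python; unreachable under Pre_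

-- ===== PORT B =====
-- _band for p > 0: indices c in range(n) with lo < p*c < hi, via floor/ceil division
def pvBandPos (p lo hi : Int) (n : Nat) : List Nat :=
  let s := max 0 (PySem.Int.floordiv lo p + 1)
  let t := min (n : Int) (-(PySem.Int.floordiv (-hi) p))
  List.range' s.toNat (t - s).toNat

-- _band: sign analysis, then the p > 0 core
def pvBand (p lo hi : Int) (n : Nat) : List Nat :=
  if p = 0 then (if lo < 0 ∧ 0 < hi then List.range n else [])
  else if p < 0 then pvBandPos (-p) (-hi) (-lo) n
  else pvBandPos p lo hi n

def detectCollisionEnemies_alt (XYBullet : List Int) (sizeBullet : List Int) (XYEnemy : List Int) (sizeEnemy : List Int) (distEnemy : List Int) (aliveEnemy : List (List Bool)) : Bool :=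
  if !(aliveEnemy.any fun col => col.any id) then true
  else
    match (PySem.List.pyGet? XYBullet) 0, (PySem.List.pyGet? XYEnemy) 0, (PySem.List.pyGet? sizeEnemy) 0, (PySem.List.pyGet? distEnemy) 0, (PySem.List.pyGet? sizeBullet) 0 with
    | some x, some xe0, some se0, some de0, some sb0 =>
      let cols := (pvBand (se0 + de0) (x - xe0 - se0) (x - xe0 + sb0) aliveEnemy.length).filter
        (fun c => (aliveEnemy.getD c []).any id)
      if cols.isEmpty then true
      else
        match (PySem.List.pyGet? XYBullet) 1, (PySem.List.pyGet? XYEnemy) 1, (PySem.List.pyGet? sizeEnemy) 1, (PySem.List.pyGet? distEnemy) 1 with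
        | some y, some ye, some se1, some de1 =>
          !(cols.any fun c =>
              (pvBand (se1 + de1) (y - ye - de1) (y - ye) (aliveEnemy.getD c []).length).any
                (fun r => (aliveEnemy.getD c []).getD r false))
        | _, _, _, _ => true  -- IndexError in Python; unreachable under Pre_
    | _, _, _, _, _ => true  -- IndexError in Python; unreachable under Pre_

-- ===== PRECONDITION & SPEC =====
-- helper for Pre_: no column that contains a live enemy passes the x-interval test
def pvNoXHit (XYBullet sizeBullet XYEnemy sizeEnemy distEnemy : List Int)
    (aliveEnemy : List (List Bool)) : Bool :=
  (List.range aliveEnemy.length).all fun i =>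
    !((aliveEnemy.getD i []).any id) ||
    !(decide (XYEnemy.getD 0 0 - sizeBullet.getD 0 0
         + (sizeEnemy.getD 0 0 + distEnemy.getD 0 0) * (i : Int) < XYBullet.getD 0 0
       ∧ XYBullet.getD 0 0 < XYEnemy.getD 0 0 + sizeEnemy.getD 0 0
         + (sizeEnemy.getD 0 0 + distEnemy.getD 0 0) * (i : Int)))

-- Pre_ is exactly the set of inputs on which A returns (no IndexError): either no live cell,
-- or all coordinate lists long enough, or all nonempty with no live column passing the x-test.
def Pre_detectCollisionEnemies (XYBullet : List Int) (sizeBullet : List Int) (XYEnemy : List Int) (sizeEnemy : List Int) (distEnemy : List Int) (aliveEnemy : List (List Bool)) : Prop :=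
  (∀ col ∈ aliveEnemy, ∀ b ∈ col, b = false)
  ∨ (2 ≤ XYBullet.length ∧ 1 ≤ sizeBullet.length ∧ 2 ≤ XYEnemy.length
      ∧ 2 ≤ sizeEnemy.length ∧ 2 ≤ distEnemy.length)
  ∨ (1 ≤ XYBullet.length ∧ 1 ≤ sizeBullet.length ∧ 1 ≤ XYEnemy.length
      ∧ 1 ≤ sizeEnemy.length ∧ 1 ≤ distEnemy.length
      ∧ pvNoXHit XYBullet sizeBullet XYEnemy sizeEnemy distEnemy aliveEnemy = true)

instance (XYBullet : List Int) (sizeBullet : List Int) (XYEnemy : List Int) (sizeEnemy : List Int) (distEnemy : List Int) (aliveEnemy : List (List Bool)) : Decidable (Pre_detectCollisionEnemies XYBullet sizeBullet XYEnemy sizeEnemy distEnemy aliveEnemy) := by unfold Pre_detectCollisionEnemies; infer_instance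

def pvWitness_detectCollisionEnemies : List Int × List Int × List Int × List Int × List Int × List (List Bool) :=
  ([3, 3], [2], [0, 0], [4, 4], [1, 1], [[true, false], [false, true]])

def Spec_detectCollisionEnemies (XYBullet : List Int) (sizeBullet : List Int) (XYEnemy : List Int) (sizeEnemy : List Int) (distEnemy : List Int) (aliveEnemy : List (List Bool)) (out : Bool) : Prop := out = detectCollisionEnemies_alt XYBullet sizeBullet XYEnemy sizeEnemy distEnemy aliveEnemy
instance (XYBullet : List Int) (sizeBullet : List Int) (XYEnemy : List Int) (sizeEnemy : List Int) (distEnemy : List Int) (aliveEnemy : List (List Bool)) (out : Bool) : Decidable (Spec_detectCollisionEnemies XYBullet sizeBullet XYEnemy sizeEnemy distEnemy aliveEnemy out) := by unfold Spec_detectCollisionEnemies; infer_instance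

-- ===== CLAIM (what is proved, stated in full; the proofs are below) =====
def Claim_equal_detectCollisionEnemies : Prop := ∀ (XYBullet : List Int) (sizeBullet : List Int) (XYEnemy : List Int) (sizeEnemy : List Int) (distEnemy : List Int) (aliveEnemy : List (List Bool)), Dom_detectCollisionEnemies XYBullet sizeBullet XYEnemy sizeEnemy distEnemy aliveEnemy → Pre_detectCollisionEnemies XYBullet sizeBullet XYEnemy sizeEnemy distEnemy aliveEnemy → Spec_detectCollisionEnemies XYBullet sizeBullet XYEnemy sizeEnemy distEnemy aliveEnemy (detectCollisionEnemies XYBullet sizeBullet XYEnemy sizeEnemy distEnemy aliveEnemy)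

-- ===== LEMMAS AND PROOFS =====

-- index reads on literal cons lists
theorem pvGet1 {x y : Int} (t : List Int) : PySem.List.pyGet? (x :: y :: t) (1 : Int) = some y := by
  simp [PySem.List.pyGet?, PySem.List.pyIdx?]

theorem pvGet0 {x : Int} (t : List Int) : PySem.List.pyGet? (x :: t) (0 : Int) = some x := by
  simp [PySem.List.pyGet?, PySem.List.pyIdx?]

-- A's x-condition rearranged into the band form
theorem pvXA_iff (xb0 sb0 xe0 se0 de0 c : Int) :
    (xb0 > xe0 + se0 * c + de0 * c - sb0 ∧ xb0 < xe0 + se0 * (c + 1) + de0 * c) ↔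
    (xb0 - xe0 - se0 < (se0 + de0) * c ∧ (se0 + de0) * c < xb0 - xe0 + sb0) := by
  constructor <;> rintro ⟨h1, h2⟩ <;> exact ⟨by nlinarith, by nlinarith⟩

-- A's y-condition rearranged into the band form
theorem pvYA_iff (xb1 xe1 se1 de1 r : Int) :
    (xb1 > xe1 + se1 * r + de1 * r ∧ xb1 < xe1 + se1 * r + de1 * (r + 1)) ↔
    (xb1 - xe1 - de1 < (se1 + de1) * r ∧ (se1 + de1) * r < xb1 - xe1) := by
  constructor <;> rintro ⟨h1, h2⟩ <;> exact ⟨by nlinarith, by nlinarith⟩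

-- membership in the p > 0 band core
theorem pvMem_bandPos (p lo hi : Int) (n : Nat) (c : Nat) (hp : 0 < p) :
    c ∈ pvBandPos p lo hi n ↔ c < n ∧ lo < p * (c : Int) ∧ p * (c : Int) < hi := by
  unfold pvBandPos
  rw [List.mem_range'_1]
  have h1 : ((c : Int) ≤ PySem.Int.floordiv lo p) ↔ (c : Int) * p ≤ lo :=
    PySem.Int.le_floordiv_iff_mul_le hp
  have h2 : ((-(c : Int)) ≤ PySem.Int.floordiv (-hi) p) ↔ (-(c : Int)) * p ≤ -hi :=
    PySem.Int.le_floordiv_iff_mul_le hp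
  have hc1 : (c : Int) * p = p * (c : Int) := by ring
  have hc2 : (-(c : Int)) * p = -(p * (c : Int)) := by ring
  rw [hc1] at h1; rw [hc2] at h2
  generalize p * (c : Int) = A at h1 h2
  generalize PySem.Int.floordiv lo p = F1 at h1 h2
  generalize PySem.Int.floordiv (-hi) p = F2 at h1 h2
  constructor
  · rintro ⟨hs, ht⟩
    refine ⟨by omega, ?_, ?_⟩
    · by_contra hA
      have : (c : Int) ≤ F1 := h1.mpr (by omega)
      omega
    · by_contra hA
      have : (-(c : Int)) ≤ F2 := h2.mpr (by omega)
      omega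
  · rintro ⟨hn, hlo, hhi⟩
    have g1 : ¬ ((c : Int) ≤ F1) := fun h => by have := h1.mp h; omega
    have g2 : ¬ ((-(c : Int)) ≤ F2) := fun h => by have := h2.mp h; omega
    omega

-- membership in the band, all signs of p
theorem pvMem_band (p lo hi : Int) (n : Nat) (c : Nat) :
    c ∈ pvBand p lo hi n ↔ c < n ∧ lo < p * (c : Int) ∧ p * (c : Int) < hi := by
  unfold pvBand
  by_cases h0 : p = 0
  · subst h0
    by_cases hc : lo < 0 ∧ 0 < hi
    · simp [hc, List.mem_range]
    · simp [hc]
  · by_cases hneg : p < 0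
    · rw [if_neg h0, if_pos hneg, pvMem_bandPos (-p) (-hi) (-lo) n c (by omega)]
      constructor <;> rintro ⟨h1, h2, h3⟩ <;> exact ⟨h1, by nlinarith, by nlinarith⟩
    · rw [if_neg h0, if_neg hneg, pvMem_bandPos p lo hi n c (by omega)]

-- boolean specification mirroring A's row scan
def pvSpecRow (x sb xe se de y ye se1 de1 c : Int) : List Bool → Int → Bool
  | [], _ => false
  | a :: rest, r =>
    (a && decide (x > xe + se * c + de * c - sb ∧ x < xe + se * (c + 1) + de * c)
       && decide (y > ye + se1 * r + de1 * r ∧ y < ye + se1 * r + de1 * (r + 1)))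
    || pvSpecRow x sb xe se de y ye se1 de1 c rest (r + 1)

-- boolean specification mirroring A's column scan
def pvSpecCol (x sb xe se de y ye se1 de1 : Int) : List (List Bool) → Int → Bool
  | [], _ => false
  | col :: rest, c =>
    pvSpecRow x sb xe se de y ye se1 de1 c col 0
    || pvSpecCol x sb xe se de y ye se1 de1 rest (c + 1)

theorem pvARow_spec (x sb xe se de y ye se1 de1 : Int)
    (xbT sbT xeT seT deT : List Int) (c : Int) :
    ∀ (col : List Bool) (r : Int),
      pvARow (x :: y :: xbT) (sb :: sbT) (xe :: ye :: xeT) (se :: se1 :: seT)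
        (de :: de1 :: deT) c col r
      = some (pvSpecRow x sb xe se de y ye se1 de1 c col r) := by
  intro col
  induction col with
  | nil => intro r; rfl
  | cons a rest ih =>
    intro r
    simp only [pvARow, pvSpecRow, pvGet0, pvGet1]
    by_cases ha : a
    · simp only [ha, if_true, Bool.true_and]
      by_cases hx : x > xe + se * c + de * c - sb ∧ x < xe + se * (c + 1) + de * c
      · simp only [hx]
        by_cases hy : y > ye + se1 * r + de1 * r ∧ y < ye + se1 * r + de1 * (r + 1)
        · simp [hy]
        · simp [hy, ih]
      · simp [hx, ih]
    · simp [ha, ih]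

theorem pvACol_spec (x sb xe se de y ye se1 de1 : Int)
    (xbT sbT xeT seT deT : List Int) :
    ∀ (cols : List (List Bool)) (c : Int),
      pvACol (x :: y :: xbT) (sb :: sbT) (xe :: ye :: xeT) (se :: se1 :: seT)
        (de :: de1 :: deT) cols c
      = some (pvSpecCol x sb xe se de y ye se1 de1 cols c) := by
  intro cols
  induction cols with
  | nil => intro c; rfl
  | cons col rest ih =>
    intro c
    simp only [pvACol, pvSpecCol, pvARow_spec]
    by_cases hr : pvSpecRow x sb xe se de y ye se1 de1 c col 0
    · simp [hr]
    · simp [hr, ih]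

-- existential characterisation of the row spec
theorem pvSpecRow_iff (x sb xe se de y ye se1 de1 c : Int) :
    ∀ (col : List Bool) (r : Int),
      pvSpecRow x sb xe se de y ye se1 de1 c col r = true ↔
      ∃ j : Nat, j < col.length ∧ col.getD j false = true ∧
        (x > xe + se * c + de * c - sb ∧ x < xe + se * (c + 1) + de * c) ∧
        (y > ye + se1 * (r + j) + de1 * (r + j) ∧
         y < ye + se1 * (r + j) + de1 * (r + j + 1)) := by
  intro col
  induction col with
  | nil => intro r; simp [pvSpecRow]
  | cons a rest ih =>
    intro r
    simp only [pvSpecRow, Bool.or_eq_true, Bool.and_eq_true, decide_eq_true_eq, ih]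
    constructor
    · rintro (⟨⟨ha, hx⟩, hy⟩ | ⟨j, hj, hget, hx, hy⟩)
      · exact ⟨0, by simp, by simpa using ha, hx, by push_cast; simpa using hy⟩
      · refine ⟨j + 1, by simpa using Nat.succ_lt_succ hj, by simpa using hget, hx, ?_⟩
        have he : r + ((j : Int) + 1) = r + 1 + (j : Int) := by ring
        push_cast
        rw [he]
        exact hy
    · rintro ⟨j, hj, hget, hx, hy⟩
      cases j with
      | zero => exact Or.inl ⟨⟨by simpa using hget, hx⟩, by push_cast at hy; simpa using hy⟩
      | succ j =>
        refine Or.inr ⟨j, by simpa using Nat.lt_of_succ_lt_succ hj, by simpa using hget, hx, ?_⟩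
        have he : r + ((j : Int) + 1) = r + 1 + (j : Int) := by ring
        push_cast at hy
        rw [he] at hy
        exact hy

-- existential characterisation of the column spec
theorem pvSpecCol_iff (x sb xe se de y ye se1 de1 : Int) :
    ∀ (cols : List (List Bool)) (c : Nat),
      pvSpecCol x sb xe se de y ye se1 de1 cols (c : Int) = true ↔
      ∃ i : Nat, i < cols.length ∧
        pvSpecRow x sb xe se de y ye se1 de1 ((c + i : Nat) : Int) (cols.getD i []) 0 = true := by
  intro cols
  induction cols with
  | nil => intro c; simp [pvSpecCol]
  | cons col rest ih =>
    intro c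
    have hcast : ((c : Int) + 1) = ((c + 1 : Nat) : Int) := by push_cast; ring
    simp only [pvSpecCol, Bool.or_eq_true, hcast, ih]
    constructor
    · rintro (h | ⟨i, hi, h⟩)
      · exact ⟨0, by simp, by simpa using h⟩
      · refine ⟨i + 1, by simpa using Nat.succ_lt_succ hi, ?_⟩
        have : (c + 1 + i : Nat) = (c + (i + 1) : Nat) := by omega
        rw [this] at h
        simpa using h
    · rintro ⟨i, hi, h⟩
      cases i with
      | zero => exact Or.inl (by simpa using h)
      | succ i =>
        refine Or.inr ⟨i, by simpa using Nat.lt_of_succ_lt_succ hi, ?_⟩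
        have : (c + 1 + i : Nat) = (c + (i + 1) : Nat) := by omega
        rw [this]
        simpa using h

-- a live cell read by getD makes the column's any-test true
theorem pvAny_of_getD (col : List Bool) (r : Nat) (hr : r < col.length)
    (hget : col.getD r false = true) : col.any id = true := by
  rw [List.getD_eq_getElem col false hr] at hget
  exact List.any_eq_true.mpr ⟨col[r], List.getElem_mem hr, hget⟩

-- B's inner band-any over one column ↔ a hit row exists in that column
theorem pvInner_iff (y ye se1 de1 : Int) (col : List Bool) :
    ((pvBand (se1 + de1) (y - ye - de1) (y - ye) col.length).any
      (fun r => col.getD r false)) = true ↔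
    ∃ r : Nat, r < col.length ∧ col.getD r false = true ∧
      (y > ye + se1 * (r : Int) + de1 * (r : Int) ∧
       y < ye + se1 * (r : Int) + de1 * ((r : Int) + 1)) := by
  rw [List.any_eq_true]
  constructor
  · rintro ⟨r, hmem, hget⟩
    rw [pvMem_band] at hmem
    exact ⟨r, hmem.1, hget, (pvYA_iff y ye se1 de1 (r : Int)).mpr ⟨by linarith [hmem.2.1], by linarith [hmem.2.2]⟩⟩
  · rintro ⟨r, hlen, hget, hy⟩
    have := (pvYA_iff y ye se1 de1 (r : Int)).mp hy
    exact ⟨r, (pvMem_band _ _ _ _ _).mpr ⟨hlen, this.1, this.2⟩, hget⟩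

-- the combined existential both programs decide (under full coordinate lists)
theorem pvHit_iff (x sb xe se de y ye se1 de1 : Int) (cols : List (List Bool)) :
    pvSpecCol x sb xe se de y ye se1 de1 cols 0 = true ↔
    ∃ c : Nat, c < cols.length ∧
      (x > xe + se * (c : Int) + de * (c : Int) - sb ∧
       x < xe + se * ((c : Int) + 1) + de * (c : Int)) ∧
      ∃ r : Nat, r < (cols.getD c []).length ∧ (cols.getD c []).getD r false = true ∧
        (y > ye + se1 * (r : Int) + de1 * (r : Int) ∧
         y < ye + se1 * (r : Int) + de1 * ((r : Int) + 1)) := by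
  have h0 : (0 : Int) = ((0 : Nat) : Int) := rfl
  rw [h0, pvSpecCol_iff]
  constructor
  · rintro ⟨i, hi, h⟩
    rw [pvSpecRow_iff] at h
    obtain ⟨j, hj, hget, hx, hy⟩ := h
    refine ⟨i, hi, by simpa using hx, j, hj, hget, ?_⟩
    constructor <;> [exact (by simpa using hy.1); exact (by simpa using hy.2)]
  · rintro ⟨c, hc, hx, r, hr, hget, hy⟩
    refine ⟨c, hc, ?_⟩
    rw [pvSpecRow_iff]
    exact ⟨r, hr, hget, by simpa using hx, by simpa using hy.1, by simpa using hy.2⟩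

-- a hit implies some cell is alive
theorem pvLive_of_hit (x sb xe se de y ye se1 de1 : Int) (cols : List (List Bool))
    (h : pvSpecCol x sb xe se de y ye se1 de1 cols 0 = true) :
    (cols.any fun col => col.any id) = true := by
  rw [pvHit_iff] at h
  obtain ⟨c, hc, _, r, hr, hget, _⟩ := h
  refine List.any_eq_true.mpr ⟨cols.getD c [], ?_, pvAny_of_getD _ r hr hget⟩
  rw [List.getD_eq_getElem cols [] hc]
  exact List.getElem_mem hc

-- old A-side lemmas for the degenerate Pre_ cases
theorem pvARow_dead (XYB sB XYE sE dE : List Int) (c : Int) :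
    ∀ (col : List Bool) (r : Int), col.any id = false →
      pvARow XYB sB XYE sE dE c col r = some false := by
  intro col
  induction col with
  | nil => intro r _; rfl
  | cons a rest ih =>
    intro r h
    simp only [List.any_cons, Bool.or_eq_false_iff, id] at h
    simp [pvARow, h.1, ih _ h.2]

theorem pvACol_dead (XYB sB XYE sE dE : List Int) :
    ∀ (cols : List (List Bool)) (c : Int), (∀ col ∈ cols, col.any id = false) →
      pvACol XYB sB XYE sE dE cols c = some false := by
  intro cols
  induction cols with
  | nil => intro c _; rfl
  | cons col rest ih =>
    intro c h
    simp only [pvACol, pvARow_dead XYB sB XYE sE dE c col 0 (h col (by simp))]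
    exact ih _ fun col hc => h col (by simp [hc])

theorem pvARow_noXA (xb0 sb0 xe0 se0 de0 : Int) (xbT sbT xeT seT deT : List Int) (c : Int)
    (hx : ¬ (xe0 - sb0 + (se0 + de0) * c < xb0 ∧ xb0 < xe0 + se0 + (se0 + de0) * c)) :
    ∀ (col : List Bool) (r : Int),
      pvARow (xb0 :: xbT) (sb0 :: sbT) (xe0 :: xeT) (se0 :: seT) (de0 :: deT) c col r
      = some false := by
  intro col
  induction col with
  | nil => intro r; rfl
  | cons a rest ih =>
    intro r
    by_cases ha : a
    · simp only [pvARow, ha, if_true, pvGet0]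
      rw [if_neg (fun hc => hx (by
        have := (pvXA_iff xb0 sb0 xe0 se0 de0 c).mp hc
        exact ⟨by linarith [this.1], by linarith [this.2]⟩))]
      exact ih _
    · simp only [pvARow, ha, Bool.false_eq_true, if_false]
      exact ih _

theorem pvACol_noX (xb0 sb0 xe0 se0 de0 : Int) (xbT sbT xeT seT deT : List Int) :
    ∀ (cols : List (List Bool)) (c : Nat),
      (∀ i < cols.length, (cols.getD i []).any id = true →
        ¬ (xe0 - sb0 + (se0 + de0) * ((c + i : Nat) : Int) < xb0
           ∧ xb0 < xe0 + se0 + (se0 + de0) * ((c + i : Nat) : Int))) →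
      pvACol (xb0 :: xbT) (sb0 :: sbT) (xe0 :: xeT) (se0 :: seT) (de0 :: deT) cols (c : Int)
      = some false := by
  intro cols
  induction cols with
  | nil => intro c _; rfl
  | cons col rest ih =>
    intro c h
    have hrow : pvARow (xb0 :: xbT) (sb0 :: sbT) (xe0 :: xeT) (se0 :: seT) (de0 :: deT)
        (c : Int) col 0 = some false := by
      by_cases hany : col.any id
      · exact pvARow_noXA xb0 sb0 xe0 se0 de0 xbT sbT xeT seT deT (c : Int)
          (by simpa using h 0 (by simp) (by simpa using hany)) col 0
      · exact pvARow_dead _ _ _ _ _ _ col 0 (by simpa using hany)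
    simp only [pvACol, hrow]
    have : ((c : Int) + 1) = ((c + 1 : Nat) : Int) := by push_cast; ring
    rw [this]
    apply ih
    intro i hi hia
    have := h (i + 1) (by simpa using Nat.succ_lt_succ hi) (by simpa using hia)
    have harg : (c + 1 + i : Nat) = (c + (i + 1) : Nat) := by omega
    rw [harg]
    exact this

-- ===== VERDICT (by name: the statement is the Claim_ definition above) =====
theorem detectCollisionEnemies_spec : Claim_equal_detectCollisionEnemies := by
  intro XYBullet sizeBullet XYEnemy sizeEnemy distEnemy aliveEnemy _ hPre
  unfold Spec_detectCollisionEnemies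
  rcases hPre with h1 | ⟨h2a, h2b, h2c, h2d, h2e⟩ | ⟨h3a, h3b, h3c, h3d, h3e, h3f⟩
  · -- no live enemy at all
    have hdeadcol : ∀ col ∈ aliveEnemy, col.any id = false := by
      intro col hc
      simp only [List.any_eq_false]
      intro b hb
      simp [h1 col hc b hb]
    have hdead : (aliveEnemy.any fun col => col.any id) = false := by
      simp only [List.any_eq_false]
      intro col hc
      simp [hdeadcol col hc]
    simp only [detectCollisionEnemies, detectCollisionEnemies_alt, hdead,
      pvACol_dead _ _ _ _ _ aliveEnemy 0 hdeadcol]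
    rfl
  · -- all coordinate lists long enough: both decide the same existential
    rcases XYBullet with _ | ⟨x, _ | ⟨y, xbT⟩⟩ <;> simp at h2a
    rcases sizeBullet with _ | ⟨sb, sbT⟩; · simp at h2b
    rcases XYEnemy with _ | ⟨xe, _ | ⟨ye, xeT⟩⟩ <;> simp at h2c
    rcases sizeEnemy with _ | ⟨se, _ | ⟨se1, seT⟩⟩ <;> simp at h2d
    rcases distEnemy with _ | ⟨de, _ | ⟨de1, deT⟩⟩ <;> simp at h2e
    simp only [detectCollisionEnemies, pvACol_spec]
    by_cases hlive : (aliveEnemy.any fun col => col.any id) = true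
    · simp only [detectCollisionEnemies_alt, hlive, Bool.not_true, Bool.false_eq_true,
        if_false, pvGet0, pvGet1]
      set cols := (pvBand (se + de) (x - xe - se) (x - xe + sb) aliveEnemy.length).filter
        (fun c => (aliveEnemy.getD c []).any id) with hcols
      by_cases hemp : cols.isEmpty
      · -- no live candidate column: no hit exists
        rw [if_pos hemp]
        have hnohit : pvSpecCol x sb xe se de y ye se1 de1 aliveEnemy 0 = false := by
          by_contra hcon
          rw [Bool.not_eq_false, pvHit_iff] at hcon
          obtain ⟨c, hc, hx, r, hr, hget, _⟩ := hcon
          have hxb := (pvXA_iff x sb xe se de (c : Int)).mp hx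
          have hmem : (c : Nat) ∈ cols := by
            rw [hcols, List.mem_filter]
            exact ⟨(pvMem_band _ _ _ _ _).mpr ⟨hc, hxb.1, hxb.2⟩, pvAny_of_getD _ r hr hget⟩
          rw [List.isEmpty_iff] at hemp
          simp [hemp] at hmem
        simp [hnohit]
      · rw [if_neg hemp]
        -- both sides decide the existence of a hit cell
        congr 1
        rw [Bool.eq_iff_iff, List.any_eq_true, pvHit_iff]
        constructor
        · rintro ⟨c, hc, hx, r, hr, hget, hy⟩
          have hxb := (pvXA_iff x sb xe se de (c : Int)).mp hx
          refine ⟨c, ?_, ?_⟩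
          · rw [hcols, List.mem_filter]
            exact ⟨(pvMem_band _ _ _ _ _).mpr ⟨hc, hxb.1, hxb.2⟩, pvAny_of_getD _ r hr hget⟩
          · exact (pvInner_iff y ye se1 de1 _).mpr ⟨r, hr, hget, hy⟩
        · rintro ⟨c, hmem, hin⟩
          rw [hcols, List.mem_filter] at hmem
          have hband := (pvMem_band _ _ _ _ c).mp hmem.1
          obtain ⟨r, hr, hget, hy⟩ := (pvInner_iff y ye se1 de1 _).mp hin
          exact ⟨c, hband.1,
            (pvXA_iff x sb xe se de (c : Int)).mpr ⟨hband.2.1, hband.2.2⟩, r, hr, hget, hy⟩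
    · -- no live cell: both return true
      have hnohit : pvSpecCol x sb xe se de y ye se1 de1 aliveEnemy 0 = false := by
        by_contra hcon
        rw [Bool.not_eq_false] at hcon
        exact hlive (pvLive_of_hit _ _ _ _ _ _ _ _ _ _ hcon)
      rw [Bool.not_eq_true] at hlive
      simp [detectCollisionEnemies_alt, hlive, hnohit]
  · -- all lists nonempty, no live column passes the x-test: both return True
    rcases XYBullet with _ | ⟨x, xbT⟩; · simp at h3a
    rcases sizeBullet with _ | ⟨sb, sbT⟩; · simp at h3b
    rcases XYEnemy with _ | ⟨xe, xeT⟩; · simp at h3c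
    rcases sizeEnemy with _ | ⟨se, seT⟩; · simp at h3d
    rcases distEnemy with _ | ⟨de, deT⟩; · simp at h3e
    have hno : ∀ i < aliveEnemy.length, (aliveEnemy.getD i []).any id = true →
        ¬ (xe - sb + (se + de) * ((0 + i : Nat) : Int) < x
           ∧ x < xe + se + (se + de) * ((0 + i : Nat) : Int)) := by
      intro i hi hia
      have hall := h3f
      simp only [pvNoXHit, List.all_eq_true, List.mem_range] at hall
      have h' := hall i hi
      simp only [Bool.or_eq_true, Bool.not_eq_true'] at h'
      rcases h' with h' | h'
      · rw [List.any_eq_true] at hia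
        obtain ⟨b, hb, hbid⟩ := hia
        rw [List.any_eq_false] at h'
        exact absurd hbid (h' b hb)
      · simp only [decide_eq_false_iff_not] at h'
        simpa using h'
    have hA := pvACol_noX x sb xe se de xbT sbT xeT seT deT aliveEnemy 0 hno
    simp only [Nat.cast_zero] at hA
    rw [detectCollisionEnemies, hA]
    -- B: the filtered candidate list is empty
    by_cases hlive : (aliveEnemy.any fun col => col.any id) = true
    · have hempty : (pvBand (se + de) (x - xe - se) (x - xe + sb) aliveEnemy.length).filter
          (fun c => (aliveEnemy.getD c []).any id) = [] := by
        rw [List.filter_eq_nil_iff]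
        intro c hmem hany
        have hband := (pvMem_band _ _ _ _ c).mp hmem
        have := hno c hband.1 hany
        simp only [Nat.zero_add] at this
        exact this ⟨by linarith [hband.2.2], by linarith [hband.2.1]⟩
      have hemp : ((pvBand (se + de) (x - xe - se) (x - xe + sb) aliveEnemy.length).filter
          (fun c => (aliveEnemy.getD c []).any id)).isEmpty = true := by
        rw [hempty]; rfl
      simp only [detectCollisionEnemies_alt, hlive, Bool.not_true, Bool.false_eq_true,
        if_false, pvGet0, hemp, if_true]
      rfl
    · rw [Bool.not_eq_true] at hlive
      simp [detectCollisionEnemies_alt, hlive]
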